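-- pv_equiv track=rewrite | github.com/omarkhan5299/1BM17CS138 | Q6.py | mycheck
-- ===== SOURCE A (Python) =====
-- def mycheck(str1):
--     list(str1)
--     count = int(0)
--     for el in str1:
--         if el == '(':
--             count+=1
--         elif el == ')':
--             count-=1
--         elif el == '[':
--             count+=2
--         elif el == ']':
--             count-=2
--         elif el == '{':
--             count+=3
--         elif el == '}':
--             count-=3
--         else:
--             pass
--
--     if count == int(0):
--             return 1
--     else:
--             return 0
-- ===== SOURCE B (Python) =====
-- W = {'(': 1, ')': -1, '[': 2, ']': -2, '{': 3, '}': -3}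
--
-- def mycheck(str1):
--     def wsum(s):
--         if len(s) == 0:
--             return 0
--         if len(s) == 1:
--             return W.get(s, 0)
--         m = len(s) // 2
--         return wsum(s[:m]) + wsum(s[m:])
--     return 1 if wsum(str1) == 0 else 0
-- ===== Notes on version B (the rewrite author's own statement) =====
-- stated objective: alternative
-- what changed: Replaces A's fused left-to-right accumulator loop with an if/elif chain by a divide-and-conquer recursion: the string is split in half, the two weighted sums are computed recursively and added, with a module-level dict lookup giving the weight of a single character; the dead list(str1) call is dropped.
import Mathlib
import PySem

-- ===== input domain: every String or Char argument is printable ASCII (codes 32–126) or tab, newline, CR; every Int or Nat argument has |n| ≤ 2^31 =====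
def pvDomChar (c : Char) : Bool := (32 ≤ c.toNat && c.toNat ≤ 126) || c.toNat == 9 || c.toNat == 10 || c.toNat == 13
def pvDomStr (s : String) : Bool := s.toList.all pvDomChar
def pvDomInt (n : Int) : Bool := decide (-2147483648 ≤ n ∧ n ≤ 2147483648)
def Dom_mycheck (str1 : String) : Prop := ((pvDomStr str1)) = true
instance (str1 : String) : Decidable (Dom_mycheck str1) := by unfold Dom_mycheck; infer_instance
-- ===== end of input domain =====

-- B replaces A's fused accumulator loop by a divide-and-conquer recursion (halve the string,
-- add the two weighted sums; a dict lookup at single characters); alternative decomposition, not faster.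

-- ===== PORT A =====
-- literal port of A's loop; the dead `list(str1)` expression has no effect and no Lean counterpart
def mycheck (str1 : String) : Int :=
  let count : Int :=
    str1.toList.foldl (fun count el =>
      if el = '(' then count + 1
      else if el = ')' then count - 1
      else if el = '[' then count + 2
      else if el = ']' then count - 2
      else if el = '{' then count + 3
      else if el = '}' then count - 3
      else count) 0
  if count = 0 then 1 else 0

-- ===== PORT B =====
-- the module-level dict W (keys are the 1-char bracket strings, here Chars)
def pvWdict : PySem.Dict Char Int :=
  PySem.Dict.ofList [('(', 1), (')', -1), ('[', 2), (']', -2), ('{', 3), ('}', -3)]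

-- wsum: len 0 → 0; len 1 → W.get(s, 0); else split at len//2 and add
def pvWsum : List Char → Int
  | [] => 0
  | [c] => PySem.Dict.getD pvWdict c 0
  | a :: b :: t =>
    let m := (a :: b :: t).length / 2
    pvWsum ((a :: b :: t).take m) + pvWsum ((a :: b :: t).drop m)
termination_by l => l.length
decreasing_by
  · simp [List.length_take]; omega
  · simp [List.length_drop]; omega

def mycheck_alt (str1 : String) : Int :=
  if pvWsum str1.toList = 0 then 1 else 0

-- ===== PRECONDITION & SPEC =====
def Spec_mycheck (str1 : String) (out : Int) : Prop := out = mycheck_alt str1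
instance (str1 : String) (out : Int) : Decidable (Spec_mycheck str1 out) := by unfold Spec_mycheck; infer_instance

-- ===== CLAIM (what is proved, stated in full; the proofs are below) =====
def Claim_equal_mycheck : Prop := ∀ (str1 : String), Dom_mycheck str1 → Spec_mycheck str1 (mycheck str1)

-- ===== LEMMAS AND PROOFS =====

-- per-character weight, the common denominator of both programs
def pvW (c : Char) : Int :=
  if c = '(' then 1
  else if c = ')' then -1
  else if c = '[' then 2
  else if c = ']' then -2
  else if c = '{' then 3
  else if c = '}' then -3
  else 0

theorem getD_W (c : Char) : PySem.Dict.getD pvWdict c 0 = pvW c := by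
  have hd : pvWdict = PySem.Dict.mk
      [('(', 1), (')', -1), ('[', 2), (']', -2), ('{', 3), ('}', -3)] := by decide
  by_cases h1 : c = '('
  · subst h1; decide
  by_cases h2 : c = ')'
  · subst h2; decide
  by_cases h3 : c = '['
  · subst h3; decide
  by_cases h4 : c = ']'
  · subst h4; decide
  by_cases h5 : c = '{'
  · subst h5; decide
  by_cases h6 : c = '}'
  · subst h6; decide
  simp [PySem.Dict.getD, hd, PySem.Dict.get?, pvW,
    Ne.symm h1, Ne.symm h2, Ne.symm h3, Ne.symm h4, Ne.symm h5, Ne.symm h6,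
    h1, h2, h3, h4, h5, h6]

theorem wsum_eq (l : List Char) : pvWsum l = (l.map pvW).sum := by
  generalize hn : l.length = n
  induction n using Nat.strong_induction_on generalizing l with
  | _ n ih =>
    match l, hn with
    | [], _ => simp [pvWsum]
    | [c], _ => simp [pvWsum, getD_W]
    | a :: b :: t, hn =>
      have hlen : (a :: b :: t).length = t.length + 2 := by simp
      have h1 : ((a :: b :: t).take ((a :: b :: t).length / 2)).length < n := by
        simp [List.length_take]; omega
      have h2 : ((a :: b :: t).drop ((a :: b :: t).length / 2)).length < n := by
        simp [List.length_drop]; omega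
      rw [pvWsum, ih _ h1 _ rfl, ih _ h2 _ rfl,
        ← List.sum_append, ← List.map_append, List.take_append_drop]

theorem foldA (cs : List Char) (a : Int) :
    cs.foldl (fun count el =>
      if el = '(' then count + 1
      else if el = ')' then count - 1
      else if el = '[' then count + 2
      else if el = ']' then count - 2
      else if el = '{' then count + 3
      else if el = '}' then count - 3
      else count) a = a + (cs.map pvW).sum := by
  induction cs generalizing a with
  | nil => simp
  | cons h t ih =>
    simp only [List.foldl_cons, List.map_cons, List.sum_cons, ih]
    have : (if h = '(' then a + 1
      else if h = ')' then a - 1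
      else if h = '[' then a + 2
      else if h = ']' then a - 2
      else if h = '{' then a + 3
      else if h = '}' then a - 3
      else a) = a + pvW h := by
      unfold pvW; split_ifs <;> omega
    rw [this]; ring

-- ===== VERDICT (by name: the statement is the Claim_ definition above) =====
theorem mycheck_spec : Claim_equal_mycheck := by
  intro str1 _
  unfold Spec_mycheck mycheck mycheck_alt
  rw [foldA, wsum_eq]
  norm_num
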